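-- pv_equiv track=rewrite | github.com/Telcoltar/AdventOfCode2021 | Day 8/Python/main.py | get_special_patterns
-- ===== SOURCE A (Python) =====
-- from typing import List, Tuple, Dict
--
-- def get_special_patterns(patterns: List[str]) -> (str, str, str):
--     ret = ["", "", ""]
--     for p in patterns:
--         if len(p) == 2:
--             ret[0] = p
--         elif len(p) == 3:
--             ret[1] = p
--         elif len(p) == 4:
--             ret[2] = p
--     return ret
-- ===== SOURCE B (Python) =====
-- def get_special_patterns(patterns):
--     # For each target length, scan from the end and take the first match
--     # (= last occurrence), defaulting to "".
--     return [next((p for p in reversed(patterns) if len(p) == n), "")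
--             for n in (2, 3, 4)]
-- ===== Notes on version B (the rewrite author's own statement) =====
-- stated objective: alternative
-- what changed: Instead of one last-wins pass mutating three slots, B performs three independent staged backward scans, one per target length, each taking the first match from the reversed list with default ''.
import Mathlib
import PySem

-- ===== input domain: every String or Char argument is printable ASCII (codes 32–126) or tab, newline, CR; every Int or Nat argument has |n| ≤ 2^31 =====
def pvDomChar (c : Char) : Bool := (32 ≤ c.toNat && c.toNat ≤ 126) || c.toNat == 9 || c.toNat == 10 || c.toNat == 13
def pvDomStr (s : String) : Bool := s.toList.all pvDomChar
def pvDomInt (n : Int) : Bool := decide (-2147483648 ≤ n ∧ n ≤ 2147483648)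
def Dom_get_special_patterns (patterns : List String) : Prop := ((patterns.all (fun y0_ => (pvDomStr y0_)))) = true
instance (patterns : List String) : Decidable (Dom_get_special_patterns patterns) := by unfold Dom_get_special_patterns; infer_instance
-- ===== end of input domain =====

-- B replaces A's single last-wins pass over three mutable slots with three independent
-- backward scans, one per target length (objective: alternative; same cost).

-- ===== PORT A =====
def get_special_patterns (patterns : List String) : List String :=
  patterns.foldl (fun ret p =>
    if PySem.Str.len p = 2 then ret.set 0 p
    else if PySem.Str.len p = 3 then ret.set 1 p
    else if PySem.Str.len p = 4 then ret.set 2 p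
    else ret) ["", "", ""]

-- ===== PORT B =====
def get_special_patterns_alt (patterns : List String) : List String :=
  ([2, 3, 4] : List Int).map (fun n =>
    (patterns.reverse.find? (fun p => PySem.Str.len p == n)).getD "")

-- ===== PRECONDITION & SPEC =====
def Spec_get_special_patterns (patterns : List String) (out : List String) : Prop := out = get_special_patterns_alt patterns
instance (patterns : List String) (out : List String) : Decidable (Spec_get_special_patterns patterns out) := by unfold Spec_get_special_patterns; infer_instance

-- ===== CLAIM (what is proved, stated in full; the proofs are below) =====
def Claim_equal_get_special_patterns : Prop := ∀ (patterns : List String), Dom_get_special_patterns patterns → Spec_get_special_patterns patterns (get_special_patterns patterns)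

-- ===== LEMMAS AND PROOFS =====

-- last occurrence of a pattern of length n in ps, with fallback x
def gspLastD (n : Int) (x : String) (ps : List String) : String :=
  (ps.reverse.find? (fun p => PySem.Str.len p == n)).getD x

theorem gspLastD_cons (n : Int) (x p : String) (ps : List String) :
    gspLastD n x (p :: ps) = gspLastD n (if PySem.Str.len p = n then p else x) ps := by
  unfold gspLastD
  rw [List.reverse_cons, List.find?_append]
  cases h : ps.reverse.find? (fun p => PySem.Str.len p == n) with
  | some q => simp
  | none => by_cases hp : ((p.length : Int) = n) <;> simp [hp]

-- Loop invariant for A's fold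
theorem gsp_inv (ps : List String) (x y z : String) :
    ps.foldl (fun ret p =>
        if PySem.Str.len p = 2 then ret.set 0 p
        else if PySem.Str.len p = 3 then ret.set 1 p
        else if PySem.Str.len p = 4 then ret.set 2 p
        else ret) [x, y, z] =
      [gspLastD 2 x ps, gspLastD 3 y ps, gspLastD 4 z ps] := by
  induction ps generalizing x y z with
  | nil => simp [gspLastD]
  | cons p ps ih =>
    simp only [List.foldl_cons]
    rw [gspLastD_cons, gspLastD_cons, gspLastD_cons]
    by_cases h2 : PySem.Str.len p = 2
    · have h3 : PySem.Str.len p ≠ 3 := by omega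
      have h4 : PySem.Str.len p ≠ 4 := by omega
      simp only [h2, if_pos, List.set]
      simpa using ih p y z
    · by_cases h3 : PySem.Str.len p = 3
      · have h4 : PySem.Str.len p ≠ 4 := by omega
        simp only [h3, if_true, List.set]
        simpa using ih x p z
      · by_cases h4 : PySem.Str.len p = 4
        · simp only [h4, if_true, List.set]
          simpa using ih x y p
        · simp only [h2, h3, h4, if_false]
          simpa [h2, h3, h4] using ih x y z

-- ===== VERDICT (by name: the statement is the Claim_ definition above) =====
theorem get_special_patterns_spec : Claim_equal_get_special_patterns := by
  intro patterns _
  unfold Spec_get_special_patterns get_special_patterns get_special_patterns_alt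
  rw [gsp_inv]
  simp [gspLastD, List.map]
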